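-- pv_equiv track=rewrite | github.com/chopheltenzin36/Machine-Learning-training-Final-Project | main.py | analyze_workload
-- ===== SOURCE A (Python) =====
-- def analyze_workload(standard_hours, daily_hours):
--     total_hours = sum(daily_hours.values())
--     total_extra_hours = sum(max(0, hours - standard_hours.get(day, 0)) for day, hours in daily_hours.items())
--     days_overworked = sum(1 for day, hours in daily_hours.items() if hours > standard_hours.get(day, 0))
--
--     return {
--         "total_hours": total_hours,
--         "total_extra_hours": total_extra_hours,
--         "days_overworked": days_overworked
--     }
-- ===== SOURCE B (Python) =====
-- def analyze_workload(standard_hours, daily_hours):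
--     # Divide-and-conquer: each item contributes a (hours, extra, overworked) triple;
--     # halves are aggregated recursively and merged by componentwise addition.
--     def contrib(day, hours):
--         extra = hours - standard_hours.get(day, 0)
--         return (hours, max(0, extra), 1 if extra > 0 else 0)
--
--     def go(items):
--         if not items:
--             return (0, 0, 0)
--         if len(items) == 1:
--             day, hours = items[0]
--             return contrib(day, hours)
--         mid = len(items) // 2
--         t1, e1, d1 = go(items[:mid])
--         t2, e2, d2 = go(items[mid:])
--         return (t1 + t2, e1 + e2, d1 + d2)
--
--     t, e, d = go(list(daily_hours.items()))
--     return {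
--         "total_hours": t,
--         "total_extra_hours": e,
--         "days_overworked": d
--     }
-- ===== Notes on version B (the rewrite author's own statement) =====
-- stated objective: alternative
-- what changed: Replaces A's three linear sum-comprehensions with a divide-and-conquer aggregation: each item is mapped to a (hours, extra, overworked) triple, the item list is split in half recursively, and the two half-results are merged by componentwise addition; correct because all three results are sums of independent per-item contributions.
import Mathlib
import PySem

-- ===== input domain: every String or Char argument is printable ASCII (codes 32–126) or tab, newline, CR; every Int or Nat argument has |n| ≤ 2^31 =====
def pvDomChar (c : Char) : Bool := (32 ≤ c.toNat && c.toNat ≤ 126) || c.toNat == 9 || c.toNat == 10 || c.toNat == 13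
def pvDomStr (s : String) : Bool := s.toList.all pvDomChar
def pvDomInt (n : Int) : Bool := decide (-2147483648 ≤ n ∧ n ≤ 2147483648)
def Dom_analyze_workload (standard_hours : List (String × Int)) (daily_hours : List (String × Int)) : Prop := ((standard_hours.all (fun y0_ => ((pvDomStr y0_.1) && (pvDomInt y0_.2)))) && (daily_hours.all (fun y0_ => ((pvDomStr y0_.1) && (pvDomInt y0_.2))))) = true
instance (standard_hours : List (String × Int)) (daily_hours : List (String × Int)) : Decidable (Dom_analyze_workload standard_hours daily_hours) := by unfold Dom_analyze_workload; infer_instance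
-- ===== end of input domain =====

-- B replaces A's three sum-comprehensions by a divide-and-conquer aggregation of per-item
-- (hours, extra, overworked) triples merged by componentwise addition; same return value.

-- ===== PORT A =====
def analyze_workload (standard_hours : List (String × Int)) (daily_hours : List (String × Int)) : List (String × Int) :=
  let total_hours : Int := (daily_hours.map (·.2)).foldl (· + ·) 0
  let total_extra_hours : Int := daily_hours.foldl
    (fun acc dh => acc + max 0 (dh.2 - PySem.Dict.getD (PySem.Dict.mk standard_hours) dh.1 0)) 0
  let days_overworked : Int := daily_hours.foldl
    (fun acc dh => if dh.2 > PySem.Dict.getD (PySem.Dict.mk standard_hours) dh.1 0 then acc + 1 else acc) 0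
  [("total_hours", total_hours), ("total_extra_hours", total_extra_hours), ("days_overworked", days_overworked)]

-- ===== PORT B =====
-- per-item contribution (Python helper 'contrib')
def awContrib (standard_hours : List (String × Int)) (dh : String × Int) : Int × Int × Int :=
  let extra := dh.2 - PySem.Dict.getD (PySem.Dict.mk standard_hours) dh.1 0
  (dh.2, max 0 extra, if extra > 0 then 1 else 0)

-- divide-and-conquer aggregation (Python helper 'go'); items[:mid]/items[mid:] = take/drop
def awGo (standard_hours : List (String × Int)) : List (String × Int) → Int × Int × Int
  | [] => (0, 0, 0)
  | [dh] => awContrib standard_hours dh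
  | a :: b :: t =>
      let l := a :: b :: t
      let mid := l.length / 2
      let r1 := awGo standard_hours (l.take mid)
      let r2 := awGo standard_hours (l.drop mid)
      (r1.1 + r2.1, r1.2.1 + r2.2.1, r1.2.2 + r2.2.2)
  termination_by l => l.length
  decreasing_by
  · simp [List.length_take]; omega
  · simp; omega

def analyze_workload_alt (standard_hours : List (String × Int)) (daily_hours : List (String × Int)) : List (String × Int) :=
  let r := awGo standard_hours daily_hours
  [("total_hours", r.1), ("total_extra_hours", r.2.1), ("days_overworked", r.2.2)]

-- ===== PRECONDITION & SPEC =====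
def Spec_analyze_workload (standard_hours : List (String × Int)) (daily_hours : List (String × Int)) (out : List (String × Int)) : Prop := out = analyze_workload_alt standard_hours daily_hours
instance (standard_hours : List (String × Int)) (daily_hours : List (String × Int)) (out : List (String × Int)) : Decidable (Spec_analyze_workload standard_hours daily_hours out) := by unfold Spec_analyze_workload; infer_instance

-- ===== CLAIM (what is proved, stated in full; the proofs are below) =====
def Claim_equal_analyze_workload : Prop := ∀ (standard_hours : List (String × Int)) (daily_hours : List (String × Int)), Dom_analyze_workload standard_hours daily_hours → Spec_analyze_workload standard_hours daily_hours (analyze_workload standard_hours daily_hours)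

-- ===== LEMMAS AND PROOFS =====

-- the three per-item contribution components
theorem foldl_plus_eq_sum (l : List Int) (a : Int) : l.foldl (· + ·) a = a + l.sum := by
  induction l generalizing a with
  | nil => simp
  | cons x t ih => simp [List.foldl_cons, ih, add_assoc]

theorem foldl_addf_eq_sum {α : Type} (f : α → Int) (l : List α) (a : Int) :
    l.foldl (fun acc x => acc + f x) a = a + (l.map f).sum := by
  induction l generalizing a with
  | nil => simp
  | cons x t ih => simp [List.foldl_cons, ih, add_assoc]

theorem foldl_count_eq_sum {α : Type} (p : α → Prop) [DecidablePred p] (l : List α) (a : Int) :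
    l.foldl (fun acc x => if p x then acc + 1 else acc) a
      = a + (l.map (fun x => if p x then (1 : Int) else 0)).sum := by
  induction l generalizing a with
  | nil => simp
  | cons x t ih =>
    simp only [List.foldl_cons, List.map_cons, List.sum_cons, ih]
    split_ifs <;> ring

-- the D&C aggregation computes the three sums of per-item contributions
theorem awGo_eq_sums (standard_hours : List (String × Int)) (l : List (String × Int)) :
    awGo standard_hours l
      = ((l.map (fun dh => (awContrib standard_hours dh).1)).sum,
         (l.map (fun dh => (awContrib standard_hours dh).2.1)).sum,
         (l.map (fun dh => (awContrib standard_hours dh).2.2)).sum) := by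
  fun_induction awGo standard_hours l with
  | case1 => simp
  | case2 dh => simp
  | case3 a b t l mid r1 r2 ih1 ih2 =>
    have hl : a :: b :: t = List.take mid l ++ List.drop mid l :=
      (List.take_append_drop _ _).symm
    rw [show r1 = awGo standard_hours (List.take mid l) from rfl,
        show r2 = awGo standard_hours (List.drop mid l) from rfl, ih1, ih2]
    conv_rhs => rw [hl]
    simp

-- ===== VERDICT (by name: the statement is the Claim_ definition above) =====
theorem analyze_workload_spec : Claim_equal_analyze_workload := by
  intro standard_hours daily_hours _
  unfold Spec_analyze_workload analyze_workload analyze_workload_alt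
  rw [awGo_eq_sums, foldl_plus_eq_sum, foldl_addf_eq_sum, foldl_count_eq_sum]
  simp only [zero_add, awContrib]
  have hmap : List.map (fun x => if x.2 > PySem.Dict.getD (PySem.Dict.mk standard_hours) x.1 0 then (1 : Int) else 0) daily_hours
      = List.map (fun dh => if dh.2 - PySem.Dict.getD (PySem.Dict.mk standard_hours) dh.1 0 > 0 then (1 : Int) else 0) daily_hours := by
    apply List.map_congr_left
    intro dh _
    by_cases h : dh.2 - PySem.Dict.getD (PySem.Dict.mk standard_hours) dh.1 0 > 0
    · rw [if_pos h, if_pos (by omega : dh.2 > PySem.Dict.getD (PySem.Dict.mk standard_hours) dh.1 0)]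
    · rw [if_neg h, if_neg (by omega : ¬ dh.2 > PySem.Dict.getD (PySem.Dict.mk standard_hours) dh.1 0)]
  rw [hmap]
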